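-- pv_equiv track=rewrite | github.com/muhenan/Python-Algo | Companies/amazon-oa.py | find_daily_purchases
-- ===== SOURCE A (Python) =====
-- def find_daily_purchases(n):
--     """
--     Determines which volumes can be purchased each day based on the rules:
--     1. Can't purchase a volume that's already been purchased
--     2. Must own all prequels before purchasing a volume
--
--     Args:
--         n (int): Total number of volumes
--
--     Returns:
--         List[List[int]]: List of n arrays where i-th array contains volumes purchased on day i
--     """
--     # Initialize variables
--     purchased = set()  # Keep track of purchased volumes
--     result = []  # Store daily purchases
--
--     for day in range(n):
--         daily_purchases = []
--
--         # Check each volume from 1 to n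
--         for vol in range(1, n + 1):
--             # Skip if already purchased
--             if vol in purchased:
--                 continue
--
--             # Check if all prequels are owned
--             can_purchase = True
--             for prequel in range(1, vol):
--                 if prequel not in purchased:
--                     can_purchase = False
--                     break
--
--             # If we can purchase this volume, add it to today's purchases
--             if can_purchase:
--                 daily_purchases.append(vol)
--
--         # Update purchased set with today's purchases
--         purchased.update(daily_purchases)
--         # Add today's purchases to result
--         result.append(daily_purchases)
--
--     return result
-- ===== SOURCE B (Python) =====
-- def find_daily_purchases(n):
--     # Each day exactly the next volume becomes purchasable (its prequels are
--     # exactly the volumes bought on earlier days), so day i buys [i+1].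
--     return [[i] for i in range(1, n + 1)]
-- ===== Notes on version B (the rewrite author's own statement) =====
-- stated objective: faster
-- what changed: Replaces the triple nested scan (days x volumes x prequels over a purchased set) with the closed form [[i] for i in range(1, n+1)], since on day i exactly volume i+1 becomes purchasable.
import Mathlib
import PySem

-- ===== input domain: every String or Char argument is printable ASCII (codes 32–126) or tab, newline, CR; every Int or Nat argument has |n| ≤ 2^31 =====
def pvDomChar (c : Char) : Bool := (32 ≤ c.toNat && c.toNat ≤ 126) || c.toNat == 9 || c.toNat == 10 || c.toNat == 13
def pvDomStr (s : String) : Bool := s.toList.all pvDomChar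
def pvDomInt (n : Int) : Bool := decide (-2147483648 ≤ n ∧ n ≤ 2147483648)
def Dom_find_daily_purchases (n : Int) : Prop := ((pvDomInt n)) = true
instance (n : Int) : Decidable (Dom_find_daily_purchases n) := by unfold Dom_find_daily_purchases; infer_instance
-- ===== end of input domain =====

-- B replaces A's triple nested scan with the closed form [[i] for i in 1..n] (day i buys exactly volume i+1).

-- ===== PORT A =====
-- inner prequel loop with break: all prequels 1..vol-1 are in purchased (short-circuit)
def fdpCanPurchase (purchased : PySem.Set Int) (vol : Int) : Bool :=
  (PySem.List.pyRange 1 vol 1).all (fun p => purchased.contains p)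

-- body of one day: scan volumes 1..n, skip purchased, append purchasable ones
def fdpDay (purchased : PySem.Set Int) (n : Int) : List Int :=
  (PySem.List.pyRange 1 (n + 1) 1).foldl (fun daily vol =>
    if purchased.contains vol then daily
    else if fdpCanPurchase purchased vol then daily ++ [vol]
    else daily) []

-- one iteration of the day loop: compute today's purchases, update the set, append to result
def fdpStep (n : Int) (st : PySem.Set Int × List (List Int)) (_day : Int) :
    PySem.Set Int × List (List Int) :=
  let daily := fdpDay st.1 n
  (PySem.Set.update st.1 daily, st.2 ++ [daily])

def find_daily_purchases (n : Int) : List (List Int) :=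
  ((PySem.List.pyRange 0 n 1).foldl (fdpStep n) (PySem.Set.empty, [])).2

-- ===== PORT B =====
def find_daily_purchases_alt (n : Int) : List (List Int) :=
  (PySem.List.pyRange 1 (n + 1) 1).map (fun i => [i])

-- ===== PRECONDITION & SPEC =====
def Spec_find_daily_purchases (n : Int) (out : List (List Int)) : Prop := out = find_daily_purchases_alt n
instance (n : Int) (out : List (List Int)) : Decidable (Spec_find_daily_purchases n out) := by unfold Spec_find_daily_purchases; infer_instance

-- ===== CLAIM (what is proved, stated in full; the proofs are below) =====
def Claim_equal_find_daily_purchases : Prop := ∀ (n : Int), Dom_find_daily_purchases n → Spec_find_daily_purchases n (find_daily_purchases n)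

-- ===== LEMMAS AND PROOFS =====

-- the day body ignores every volume that is purchased or lacks a prequel
lemma fdp_skip (purchased : PySem.Set Int) (l : List Int) (acc : List Int)
    (h : ∀ v ∈ l, purchased.contains v = true ∨ fdpCanPurchase purchased v = false) :
    l.foldl (fun daily vol =>
      if purchased.contains vol then daily
      else if fdpCanPurchase purchased vol then daily ++ [vol]
      else daily) acc = acc := by
  induction l generalizing acc with
  | nil => rfl
  | cons x xs ih =>
    have hx := h x (List.mem_cons_self ..)
    simp only [List.foldl_cons]
    rcases hx with hx | hx
    · rw [hx]; simp only [if_true]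
      exact ih acc (fun v hv => h v (by simp [hv]))
    · by_cases hc : purchased.contains x = true
      · rw [hc]; simp only [if_true]
        exact ih acc (fun v hv => h v (by simp [hv]))
      · simp only [hc, hx]
        exact ih acc (fun v hv => h v (by simp [hv]))

-- when the purchased set is exactly {1..d}, the day buys exactly [d+1]
lemma fdp_day (n d : Int) (h0 : 0 ≤ d) (h1 : d < n) :
    fdpDay (PySem.List.pyRange 1 (d + 1) 1) n = [d + 1] := by
  have hcont : ∀ v : Int, (PySem.List.pyRange 1 (d + 1) 1).contains v = true ↔ (1 ≤ v ∧ v < d + 1) := by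
    intro v
    simp [PySem.List.mem_pyRange_one]
  unfold fdpDay
  rw [PySem.List.pyRange_one_append 1 (d + 1) (n + 1) (by omega) (by omega)]
  rw [PySem.List.pyRange_one_cons (by omega : d + 1 < n + 1)]
  rw [List.foldl_append]
  rw [fdp_skip _ _ [] (fun v hv => Or.inl (by
    have := (PySem.List.mem_pyRange_one (a := 1) (b := d + 1)).mp hv
    simp only [PySem.Set.contains_eq_listContains]
    simp [PySem.List.mem_pyRange_one]
    omega))]
  simp only [List.foldl_cons]
  have hnotmem : (PySem.List.pyRange 1 (d + 1) 1).contains (d + 1) = false := by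
    by_contra h
    have : (PySem.List.pyRange 1 (d+1) 1).contains (d+1) = true := by
      cases hb : (PySem.List.pyRange 1 (d+1) 1).contains (d+1) <;> simp_all
    have := (hcont (d + 1)).mp this
    omega
  have hcontains : PySem.Set.contains (PySem.List.pyRange 1 (d + 1) 1) (d + 1) = false := by
    simp [PySem.Set.contains_eq_listContains]
  rw [hcontains]
  simp only [Bool.false_eq_true, if_false]
  have hcan : fdpCanPurchase (PySem.List.pyRange 1 (d + 1) 1) (d + 1) = true := by
    unfold fdpCanPurchase
    rw [List.all_eq_true]
    intro p hp
    have := (PySem.List.mem_pyRange_one (a := 1) (b := d + 1)).mp hp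
    simpa [PySem.Set.contains_eq_listContains] using (hcont p).mpr this
  rw [hcan]
  simp only [if_true, List.nil_append]
  apply fdp_skip
  intro v hv
  have hvmem := (PySem.List.mem_pyRange_one (a := d + 1 + 1) (b := n + 1)).mp hv
  right
  unfold fdpCanPurchase
  rw [List.all_eq_false]
  refine ⟨d + 1, (PySem.List.mem_pyRange_one).mpr (by omega), ?_⟩
  simp [PySem.Set.contains_eq_listContains]

-- outer loop invariant: after the days k..n-1, the result gains [[k+1]], …, [[n]]
lemma fdp_outer (m : Nat) : ∀ (n k : Int) (acc : List (List Int)), 0 ≤ k → k + m = n →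
    (PySem.List.pyRange k n 1).foldl (fdpStep n) (PySem.List.pyRange 1 (k + 1) 1, acc)
      = (PySem.List.pyRange 1 (n + 1) 1,
         acc ++ (PySem.List.pyRange (k + 1) (n + 1) 1).map (fun i => [i])) := by
  induction m with
  | zero =>
    intro n k acc hk hkn
    have hk' : k = n := by omega
    subst hk'
    rw [PySem.List.pyRange_one_eq_nil (a := k) (b := k) (by omega),
        PySem.List.pyRange_one_eq_nil (a := k + 1) (b := k + 1) (by omega)]
    simp
  | succ m ih =>
    intro n k acc hk hkn
    have hlt : k < n := by omega
    rw [PySem.List.pyRange_one_cons hlt]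
    simp only [List.foldl_cons]
    have hday : fdpDay (PySem.List.pyRange 1 (k + 1) 1) n = [k + 1] :=
      fdp_day n k hk hlt
    have hstep : fdpStep n (PySem.List.pyRange 1 (k + 1) 1, acc) k
        = (PySem.List.pyRange 1 (k + 1 + 1) 1, acc ++ [[k + 1]]) := by
      unfold fdpStep
      simp only [hday]
      have hnm : (k + 1) ∉ PySem.List.pyRange 1 (k + 1) 1 := by
        simp [PySem.List.mem_pyRange_one]
      have hupd : PySem.Set.update (PySem.List.pyRange 1 (k + 1) 1) [k + 1]
          = PySem.List.pyRange 1 (k + 1 + 1) 1 := by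
        show PySem.Set.add (PySem.List.pyRange 1 (k + 1) 1) (k + 1) = _
        rw [PySem.Set.add_of_not_mem hnm]
        rw [PySem.List.pyRange_one_succ_right (a := 1) (b := k + 1) (by omega)]
      rw [hupd]
    rw [hstep]
    rw [ih n (k + 1) (acc ++ [[k + 1]]) (by omega) (by omega)]
    rw [PySem.List.pyRange_one_cons (by omega : k + 1 < n + 1)]
    simp

-- ===== VERDICT (by name: the statement is the Claim_ definition above) =====
theorem find_daily_purchases_spec : Claim_equal_find_daily_purchases := by
  intro n _
  unfold Spec_find_daily_purchases find_daily_purchases find_daily_purchases_alt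
  by_cases hn : n ≤ 0
  · rw [PySem.List.pyRange_one_eq_nil hn, PySem.List.pyRange_one_eq_nil (by omega)]
    rfl
  · have h0 : (0 : Int) + (n.toNat : Int) = n := by omega
    have hempty : (PySem.Set.empty : PySem.Set Int) = PySem.List.pyRange 1 (0 + 1) 1 := by
      rw [PySem.List.pyRange_one_eq_nil (a := 1) (b := 0 + 1) (by omega)]; rfl
    rw [hempty, fdp_outer n.toNat n 0 [] le_rfl h0]
    simp
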